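-- pv_equiv track=rewrite | github.com/PlusLabNLP/TagPrime | src/model_utils.py | token_lens_to_offsets_masked
-- ===== SOURCE A (Python) =====
-- def token_lens_to_offsets_masked(token_lens, token_masks):
--     offsets = []
--     for seq_token_lens, seq_token_masks in zip(token_lens, token_masks):
--         seq_offsets = [0]
--         for l in seq_token_lens[:-1]:
--             seq_offsets.append(seq_offsets[-1] + l)
--         assert len(seq_offsets) == len(seq_token_masks)
--         seq_offsets = [so for so, m in zip(seq_offsets, seq_token_masks) if m == 1]
--         offsets.append(seq_offsets)
--     max_token_num = max([len(x) for x in offsets])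
--     offsets = [x+[-1]*(max_token_num - len(x)) for x in offsets]
--     return offsets
-- ===== SOURCE B (Python) =====
-- def token_lens_to_offsets_masked(token_lens, token_masks):
--     # One fused pass per sequence: a running offset `acc` is emitted for each
--     # mask==1 position and advanced by the consumed token length.
--     rows = []
--     for lens, masks in zip(token_lens, token_masks):
--         it = iter(lens)
--         acc = 0
--         row = []
--         for m in masks:
--             if m == 1:
--                 row.append(acc)
--             acc += next(it, 0)
--         rows.append(row)
--     width = max(len(r) for r in rows)
--     return [r + [-1] * (width - len(r)) for r in rows]
-- ===== Notes on version B (the rewrite author's own statement) =====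
-- stated objective: alternative
-- what changed: Replaces A's three per-sequence passes (build full prefix-offset list, assert, filter it against the mask via zip) with one fused pass that keeps a running offset and appends it only at mask==1 positions, consuming lengths from an iterator; Pre_ excludes exactly the inputs where A raises (empty zip -> ValueError from max, per-sequence length mismatch -> AssertionError).
import Mathlib
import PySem

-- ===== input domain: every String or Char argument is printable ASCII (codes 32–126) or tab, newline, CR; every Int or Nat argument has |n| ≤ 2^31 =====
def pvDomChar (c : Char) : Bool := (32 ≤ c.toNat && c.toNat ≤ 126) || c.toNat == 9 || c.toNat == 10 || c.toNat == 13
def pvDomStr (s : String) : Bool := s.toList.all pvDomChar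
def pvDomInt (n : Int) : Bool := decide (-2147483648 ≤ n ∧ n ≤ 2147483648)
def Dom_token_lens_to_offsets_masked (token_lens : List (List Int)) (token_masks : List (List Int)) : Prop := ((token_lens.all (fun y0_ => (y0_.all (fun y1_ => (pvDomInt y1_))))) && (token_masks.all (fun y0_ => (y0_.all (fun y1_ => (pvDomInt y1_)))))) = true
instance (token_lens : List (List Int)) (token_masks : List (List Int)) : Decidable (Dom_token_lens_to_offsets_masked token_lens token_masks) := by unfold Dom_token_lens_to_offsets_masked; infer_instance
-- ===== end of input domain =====

-- B fuses A's build-then-filter per-sequence passes into one running-offset pass; same cost, different decomposition.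

-- ===== PORT A =====
def token_lens_to_offsets_masked (token_lens : List (List Int)) (token_masks : List (List Int)) : List (List Int) :=
  let offsets := (token_lens.zip token_masks).foldl (fun (offs : List (List Int)) p =>
    -- seq_offsets = [0]; for l in seq_token_lens[:-1]: seq_offsets.append(seq_offsets[-1] + l)
    let seq_offsets := p.1.dropLast.foldl
      (fun (so : List Int) l => so ++ [(PySem.List.pyGet? so (-1)).getD 0 + l]) [0]
    -- assert len(seq_offsets) == len(seq_token_masks): Python raises on mismatch; excluded by Pre_
    let seq_offsets := (seq_offsets.zip p.2).filterMap (fun q => if q.2 = 1 then some q.1 else none)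
    offs ++ [seq_offsets]) []
  match PySem.List.max? (offsets.map (fun x => (x.length : Int))) (fun y => y) with
  | none => []   -- Python's max([]) raises ValueError; excluded by Pre_
  | some w => offsets.map (fun x => x ++ List.replicate (w - (x.length : Int)).toNat (-1))

-- ===== PORT B =====
-- the fused pass: for m in masks: if m == 1: row.append(acc); acc += next(it, 0)
def tloAltRow (acc : Int) (lens masks : List Int) : List Int :=
  match masks with
  | [] => []
  | m :: ms => (if m = 1 then [acc] else []) ++ tloAltRow (acc + lens.headD 0) lens.tail ms

def token_lens_to_offsets_masked_alt (token_lens : List (List Int)) (token_masks : List (List Int)) : List (List Int) :=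
  let rows := (token_lens.zip token_masks).map (fun p => tloAltRow 0 p.1 p.2)
  match PySem.List.max? (rows.map (fun r => (r.length : Int))) (fun y => y) with
  | none => []
  | some w => rows.map (fun r => r ++ List.replicate (w - (r.length : Int)).toNat (-1))

-- ===== PRECONDITION & SPEC =====
-- Pre_ excludes exactly the inputs on which A raises: an empty zip (ValueError from max([]))
-- and any zipped pair whose mask list's length differs from the offset list's max(1, len(lens)) (AssertionError).
def Pre_token_lens_to_offsets_masked (token_lens : List (List Int)) (token_masks : List (List Int)) : Prop :=
  token_lens ≠ [] ∧ token_masks ≠ [] ∧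
    ∀ p ∈ token_lens.zip token_masks, p.2.length = max 1 p.1.length
instance (token_lens : List (List Int)) (token_masks : List (List Int)) : Decidable (Pre_token_lens_to_offsets_masked token_lens token_masks) := by unfold Pre_token_lens_to_offsets_masked; infer_instance

def pvWitness_token_lens_to_offsets_masked : List (List Int) × List (List Int) := ([[2, 3], [4]], [[1, 0], [1]])

def Spec_token_lens_to_offsets_masked (token_lens : List (List Int)) (token_masks : List (List Int)) (out : List (List Int)) : Prop := out = token_lens_to_offsets_masked_alt token_lens token_masks
instance (token_lens : List (List Int)) (token_masks : List (List Int)) (out : List (List Int)) : Decidable (Spec_token_lens_to_offsets_masked token_lens token_masks out) := by unfold Spec_token_lens_to_offsets_masked; infer_instance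

-- ===== CLAIM (what is proved, stated in full; the proofs are below) =====
def Claim_equal_token_lens_to_offsets_masked : Prop := ∀ (token_lens : List (List Int)) (token_masks : List (List Int)), Dom_token_lens_to_offsets_masked token_lens token_masks → Pre_token_lens_to_offsets_masked token_lens token_masks → Spec_token_lens_to_offsets_masked token_lens token_masks (token_lens_to_offsets_masked token_lens token_masks)

-- ===== LEMMAS AND PROOFS =====
-- spine of A's prefix-sum loop: offsets after s
def tloFrom (s : Int) : List Int → List Int
  | [] => []
  | y :: ys => (s + y) :: tloFrom (s + y) ys

theorem tlo_build (ys : List Int) : ∀ (so : List Int) (x : Int),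
    ys.foldl (fun (so : List Int) l => so ++ [(PySem.List.pyGet? so (-1)).getD 0 + l]) (so ++ [x])
      = so ++ [x] ++ tloFrom x ys := by
  induction ys with
  | nil => intro so x; simp [List.foldl, tloFrom]
  | cons y ys ih =>
    intro so x
    simp only [List.foldl, tloFrom]
    rw [PySem.List.pyGet?_neg_one_append_singleton]
    have := ih (so ++ [x]) (x + y)
    simpa using this

theorem tlo_row (masks : List Int) : ∀ (lens : List Int) (acc : Int),
    masks.length = max 1 lens.length →
    ((acc :: tloFrom acc lens.dropLast).zip masks).filterMap
        (fun q => if q.2 = 1 then some q.1 else none)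
      = tloAltRow acc lens masks := by
  induction masks with
  | nil => intro lens acc h; simp at h; omega
  | cons m ms ih =>
    intro lens acc h
    match lens with
    | [] =>
      have hms : ms = [] := by simp at h; omega
      subst hms
      simp [tloFrom, tloAltRow, List.zip, List.filterMap_cons]
      split_ifs <;> simp
    | [l] =>
      have hms : ms = [] := by simp at h; omega
      subst hms
      simp [tloFrom, tloAltRow, List.zip, List.filterMap_cons]
      split_ifs <;> simp
    | l :: l' :: ls =>
      have hlen : ms.length = max 1 (l' :: ls).length := by simp at h ⊢; omega
      have := ih (l' :: ls) (acc + l) hlen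
      simp only [List.dropLast, tloFrom, tloAltRow, List.zip_cons_cons,
        List.filterMap_cons, List.headD, List.tail] at this ⊢
      split_ifs <;> simp_all

theorem tlo_foldl_append {α β : Type} (f : α → β) (xs : List α) :
    ∀ (init : List β), xs.foldl (fun acc x => acc ++ [f x]) init = init ++ xs.map f := by
  induction xs with
  | nil => simp
  | cons x xs ih => intro init; simp [List.foldl, ih]

theorem tlo_rows_eq (token_lens token_masks : List (List Int))
    (h : ∀ p ∈ token_lens.zip token_masks, p.2.length = max 1 p.1.length) :
    ((token_lens.zip token_masks).foldl (fun (offs : List (List Int)) p =>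
        let seq_offsets := p.1.dropLast.foldl
          (fun (so : List Int) l => so ++ [(PySem.List.pyGet? so (-1)).getD 0 + l]) [0]
        let seq_offsets := (seq_offsets.zip p.2).filterMap (fun q => if q.2 = 1 then some q.1 else none)
        offs ++ [seq_offsets]) [])
      = (token_lens.zip token_masks).map (fun p => tloAltRow 0 p.1 p.2) := by
  rw [tlo_foldl_append (fun p : List Int × List Int =>
    (((p.1.dropLast.foldl
      (fun (so : List Int) l => so ++ [(PySem.List.pyGet? so (-1)).getD 0 + l]) [0]).zip p.2).filterMap
      (fun q => if q.2 = 1 then some q.1 else none)))]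
  simp only [List.nil_append]
  apply List.map_congr_left
  intro p hp
  have h1 := tlo_build p.1.dropLast [] 0
  simp only [List.nil_append] at h1
  rw [h1]
  exact tlo_row p.2 p.1 0 (h p hp)

-- ===== VERDICT (by name: the statement is the Claim_ definition above) =====
theorem token_lens_to_offsets_masked_spec : Claim_equal_token_lens_to_offsets_masked := by
  intro tl tm _ hpre
  unfold Spec_token_lens_to_offsets_masked token_lens_to_offsets_masked token_lens_to_offsets_masked_alt
  rw [tlo_rows_eq tl tm hpre.2.2]
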